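-- pv_equiv track=rewrite | github.com/Chopinsky/algo-problems | challenges/499/296.BestMeetingPoint.py | best_meeting_point
-- ===== SOURCE A (Python) =====
-- from typing import Tuple, List, Dict
-- from collections import defaultdict
--
-- def best_meeting_point(points: List[Tuple[int, int]]) -> int:
--   n = len(points)
--
--   xdx, ydx = defaultdict(int), defaultdict(int)
--   for x, y in points:
--     xdx[x] += 1
--     ydx[y] += 1
--
--   # the `search` function will determine the optimal point in the
--   # coordinates array such that the total distant won't shrink anymore
--   def search(count: Dict[int, int]) -> int:
--     pos = sorted(count)
--     if len(pos) == 1: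
--       return 0
--
--     lc, rc = count[pos[0]], n-count[pos[0]]
--     ld, rd = 0, sum((p-pos[0]) * count[p] for p in pos[1:])
--
--     # optimal solution already, moving to the right will increase the
--     # total distance of {ld+rd}
--     if lc >= rc:
--       return ld + rd
--
--     # shifting the pivot point to the right, updating the total {dist}
--     # in the meantime; break when {dist} will start rising again, i.e.
--     # when lc >= rc, where for every 1 point to the right, we will add
--     # more distances than the substracted distances.
--     dist = ld + rd
--     for i in range(1, len(pos)):
--       p = pos[i]
--       diff = (p - pos[i-1]) * (lc - rc)
--       if diff >= 0:
--         break
--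
--       dist += diff
--
--       # now moving count[p] points from right side to the left side
--       # and continue the search
--       lc += count[p]
--       rc -= count[p]
--
--     return dist
--
--   return search(xdx) + search(ydx)
-- ===== SOURCE B (Python) =====
-- def best_meeting_point(points):
--   def dim(coords):
--     coords = sorted(coords)
--     m = coords[len(coords) // 2]
--     return sum(abs(c - m) for c in coords)
--   return dim([x for x, _ in points]) + dim([y for _, y in points])
-- ===== Notes on version B (the rewrite author's own statement) =====
-- stated objective: simpler
-- what changed: A builds per-value Counter dicts and incrementally walks the sorted distinct values, shifting the pivot until the left count exceeds the right count; B simply sorts each coordinate list with multiplicity, picks the median at index len//2, and sums absolute differences to it.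
import Mathlib
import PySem

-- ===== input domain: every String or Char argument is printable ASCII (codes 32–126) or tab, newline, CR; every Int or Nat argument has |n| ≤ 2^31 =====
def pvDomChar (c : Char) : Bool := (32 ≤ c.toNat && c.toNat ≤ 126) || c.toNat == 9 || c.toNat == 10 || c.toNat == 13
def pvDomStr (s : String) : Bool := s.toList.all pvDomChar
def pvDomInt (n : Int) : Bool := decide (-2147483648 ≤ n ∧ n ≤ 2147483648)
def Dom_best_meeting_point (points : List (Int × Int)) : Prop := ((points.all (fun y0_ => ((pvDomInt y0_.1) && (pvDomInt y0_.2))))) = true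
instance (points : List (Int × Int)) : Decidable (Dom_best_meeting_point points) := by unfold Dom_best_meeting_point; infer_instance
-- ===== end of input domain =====

-- B replaces A's counter-dict pivot walk by: sort each coordinate list, take the
-- median at index len//2, sum absolute differences to it (simpler, same cost).

-- ===== PORT A =====
-- the `for i in range(1, len(pos))` loop of `search`, with `prev = pos[i-1]` carried
def pvSearchLoopA (d : PySem.Dict Int Int) (prev lc rc dist : Int) : List Int → Int
  | [] => dist
  | p :: ps =>
    let diff := (p - prev) * (lc - rc)
    if 0 ≤ diff then dist
    else pvSearchLoopA d p (lc + d.getD p 0) (rc - d.getD p 0) (dist + diff) ps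

-- `search(count)`; on an empty dict Python raises IndexError at `pos[0]` (excluded by Pre_), here 0
def pvSearchA (n : Int) (d : PySem.Dict Int Int) : Int :=
  match PySem.List.sorted d.keys (fun x => x) false with
  | [] => 0
  | [_] => 0
  | p0 :: rest =>
    let lc := d.getD p0 0
    let rc := n - lc
    let rd := (rest.map (fun p => (p - p0) * d.getD p 0)).sum
    if rc ≤ lc then rd else pvSearchLoopA d p0 lc rc rd rest

def best_meeting_point (points : List (Int × Int)) : Int :=
  let n : Int := points.length
  let dicts := points.foldl
    (fun d pt => (d.1.modify pt.1 0 (· + 1), d.2.modify pt.2 0 (· + 1)))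
    (PySem.Dict.empty, PySem.Dict.empty)
  pvSearchA n dicts.1 + pvSearchA n dicts.2

-- ===== PORT B =====
-- `dim(coords)`: median of the sorted multiset, then sum of absolute gaps
def pvDimB (coords : List Int) : Int :=
  let s := PySem.List.sorted coords (fun x => x) false
  let m := PySem.List.pyGetD s (PySem.Int.floordiv (PySem.List.len s) 2) 0
  (s.map (fun c => |c - m|)).sum

def best_meeting_point_alt (points : List (Int × Int)) : Int :=
  pvDimB (points.map (fun p => p.1)) + pvDimB (points.map (fun p => p.2))

-- ===== PRECONDITION & SPEC =====
-- Pre_ excludes only the empty list, on which Python A raises IndexError (pos[0] of an empty dict).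
def Pre_best_meeting_point (points : List (Int × Int)) : Prop := points ≠ []
instance (points : List (Int × Int)) : Decidable (Pre_best_meeting_point points) := by unfold Pre_best_meeting_point; infer_instance
def pvWitness_best_meeting_point : (List (Int × Int)) := [(0, 1), (2, 3)]
def Spec_best_meeting_point (points : List (Int × Int)) (out : Int) : Prop := out = best_meeting_point_alt points
instance (points : List (Int × Int)) (out : Int) : Decidable (Spec_best_meeting_point points out) := by unfold Spec_best_meeting_point; infer_instance

-- ===== CLAIM (what is proved, stated in full; the proofs are below) =====
def Claim_equal_best_meeting_point : Prop := ∀ (points : List (Int × Int)), Dom_best_meeting_point points → Pre_best_meeting_point points → Spec_best_meeting_point points (best_meeting_point points)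

-- ===== LEMMAS AND PROOFS =====

-- total distance from the multiset cs to pivot v
def pvG (cs : List Int) (v : Int) : Int := (cs.map (fun c => |c - v|)).sum
-- number of elements of cs that are ≤ v, as an Int
def pvLe (cs : List Int) (v : Int) : Int := (cs.countP (fun c => decide (c ≤ v)) : Int)
def pvLt (cs : List Int) (v : Int) : Int := (cs.countP (fun c => decide (c < v)) : Int)

-- moving the pivot from v to w across a gap with no points strictly inside changes pvG linearly
lemma pvG_step (cs : List Int) (v w : Int) (hvw : v ≤ w)
    (hgap : ∀ c ∈ cs, c ≤ v ∨ w ≤ c) :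
    pvG cs w = pvG cs v + (w - v) * (2 * pvLe cs v - cs.length) := by
  induction cs with
  | nil => simp [pvG, pvLe]
  | cons c cs ih =>
    have hc := hgap c (by simp)
    have ih' := ih (fun c hc => hgap c (by simp [hc]))
    unfold pvG pvLe at *
    simp only [List.map_cons, List.sum_cons, List.countP_cons, List.length_cons]
    rcases hc with h | h
    · rw [abs_of_nonpos (by omega : c - w ≤ 0), abs_of_nonpos (by omega : c - v ≤ 0), ih']
      simp only [h, decide_true, if_true]
      push_cast
      ring
    · rw [abs_of_nonneg (by omega : 0 ≤ c - w), abs_of_nonneg (by omega : 0 ≤ c - v), ih']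
      by_cases h2 : c ≤ v
      · have hwv : w = v := le_antisymm (le_trans h h2) hvw
        subst hwv
        simp only [h2, decide_true, if_true]
        push_cast
        ring
      · simp only [h2, decide_false]
        push_cast
        ring

-- splitting a count at an intermediate bound
lemma pvLe_split (cs : List Int) (v w : Int) (hvw : v ≤ w) :
    pvLe cs w = pvLe cs v + (cs.countP (fun c => decide (v < c ∧ c ≤ w)) : Int) := by
  induction cs with
  | nil => simp [pvLe]
  | cons c cs ih =>
    unfold pvLe at *
    simp only [List.countP_cons]
    by_cases h1 : c ≤ v <;> by_cases h2 : c ≤ w <;>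
      simp [h1, h2, ih] <;> omega

-- a 0/1-selected sum over a nodup list containing c picks out h c
lemma pvDelta (D : List Int) (f : Int → Int) (hnd : D.Nodup) {c : Int} (hc : c ∈ D) :
    (D.map (fun p => if p = c then f p else 0)).sum = f c := by
  induction D with
  | nil => cases hc
  | cons a D ih =>
    simp only [List.map_cons, List.sum_cons]
    by_cases ha : a = c
    · subst ha
      have hz : ∀ x ∈ List.map (fun p => if p = a then f p else 0) D, x = 0 := by
        intro x hx
        rcases List.mem_map.mp hx with ⟨p, hp, rfl⟩
        have hpa : ¬ p = a := fun e => (List.nodup_cons.mp hnd).1 (e ▸ hp)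
        simp [hpa]
      rw [if_pos rfl, List.sum_eq_zero hz]
      ring
    · have hcD : c ∈ D := by
        rcases List.mem_cons.mp hc with he | he
        · exact absurd he.symm ha
        · exact he
      rw [if_neg ha, ih (List.nodup_cons.mp hnd).2 hcD]
      ring

-- grouping a sum over cs by the distinct values D
lemma pvGroup (cs D : List Int) (h : Int → Int) (hnd : D.Nodup)
    (hcov : ∀ c ∈ cs, c ∈ D) :
    (D.map (fun p => (cs.count p : Int) * h p)).sum = (cs.map h).sum := by
  induction cs with
  | nil => simp
  | cons c cs ih =>
    have hcD := hcov c (by simp)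
    have ih' := ih (fun x hx => hcov x (by simp [hx]))
    simp only [List.map_cons, List.sum_cons]
    rw [← ih', ← pvDelta D h hnd hcD, ← PySem.List.sum_map_add_int]
    congr 1
    apply List.map_congr_left
    intro p _
    rw [List.count_cons]
    by_cases hp : p = c
    · simp only [hp, BEq.rfl, if_true]
      push_cast
      ring
    · have hcp : ¬ c = p := fun e => hp e.symm
      simp [hp, hcp]

-- countP congruence on members
lemma pvCountP_congr (l : List Int) (p q : Int → Bool) (h : ∀ a ∈ l, p a = q a) :
    l.countP p = l.countP q := by
  induction l with
  | nil => rfl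
  | cons a l ih => simp [List.countP_cons, h a (by simp), ih (fun x hx => h x (by simp [hx]))]

-- splitting a strict count at an intermediate bound
lemma pvLt_split (cs : List Int) (v w : Int) (hvw : v < w) :
    pvLt cs w = pvLe cs v + (cs.countP (fun c => decide (v < c ∧ c < w)) : Int) := by
  induction cs with
  | nil => simp [pvLt, pvLe]
  | cons c cs ih =>
    unfold pvLt pvLe at *
    simp only [List.countP_cons]
    by_cases h1 : c ≤ v <;> by_cases h2 : c < w <;>
      simp [h1, h2, ih] <;> omega

-- once 2·(count ≤ v) ≥ n at a value v ≤ m, the distance at v already equals the distance at m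
lemma pvStop (cs : List Int) (m v : Int) (hvm : v ≤ m)
    (hmLt : 2 * pvLt cs m ≤ (cs.length : Int))
    (hstop : (cs.length : Int) ≤ 2 * pvLe cs v) :
    pvG cs v = pvG cs m := by
  rcases eq_or_lt_of_le hvm with rfl | hlt
  · rfl
  · have h1 : pvLe cs v ≤ pvLt cs m := by
      unfold pvLe pvLt
      exact_mod_cast List.countP_mono_left (fun c _ hc => by
        simp only [decide_eq_true_eq] at hc ⊢; omega)
    have hsplit := pvLt_split cs v m hlt
    have hbet : (cs.countP (fun c => decide (v < c ∧ c < m)) : Int) = 0 := by omega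
    have hgap : ∀ c ∈ cs, c ≤ v ∨ m ≤ c := by
      intro c hc
      have hz : cs.countP (fun c => decide (v < c ∧ c < m)) = 0 := by exact_mod_cast hbet
      have := List.countP_eq_zero.mp hz c hc
      simp only [decide_eq_true_eq] at this
      omega
    rw [pvG_step cs v m hvm hgap]
    have : 2 * pvLe cs v - (cs.length : Int) = 0 := by omega
    rw [this]
    ring

-- the loop invariant: walking the remaining distinct values from pivot v lands on pvG m
lemma pvLoop (cs : List Int) (m : Int) (hm : m ∈ cs)
    (hmLt : 2 * pvLt cs m ≤ (cs.length : Int))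
    (hmLe : (cs.length : Int) < 2 * pvLe cs m) :
    ∀ (qs : List Int) (v : Int), v ∈ cs → v ≤ m →
    qs.Pairwise (· < ·) → (∀ p ∈ qs, v < p ∧ p ∈ cs) →
    (∀ c ∈ cs, c ≤ v ∨ c ∈ qs) →
    pvSearchLoopA (PySem.Dict.counter cs) v (pvLe cs v) ((cs.length : Int) - pvLe cs v) (pvG cs v) qs
      = pvG cs m := by
  intro qs
  induction qs with
  | nil =>
    intro v hv hvm _ _ hcov
    have hmv : m ≤ v := by
      rcases hcov m hm with h | h
      · exact h
      · cases h
    have : v = m := le_antisymm hvm hmv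
    subst this
    rfl
  | cons p ps ih =>
    intro v hv hvm hpair hmemq hcov
    have hvp : v < p := (hmemq p (List.mem_cons_self)).1
    have hpcs : p ∈ cs := (hmemq p (List.mem_cons_self)).2
    obtain ⟨hhead, htail⟩ := List.pairwise_cons.mp hpair
    show (if 0 ≤ (p - v) * (pvLe cs v - ((cs.length : Int) - pvLe cs v)) then pvG cs v
      else pvSearchLoopA (PySem.Dict.counter cs) p
        (pvLe cs v + (PySem.Dict.counter cs).getD p 0)
        ((cs.length : Int) - pvLe cs v - (PySem.Dict.counter cs).getD p 0)
        (pvG cs v + (p - v) * (pvLe cs v - ((cs.length : Int) - pvLe cs v))) ps) = pvG cs m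
    by_cases hd : 0 ≤ (p - v) * (pvLe cs v - ((cs.length : Int) - pvLe cs v))
    · rw [if_pos hd]
      have h0 : (0 : Int) ≤ pvLe cs v - ((cs.length : Int) - pvLe cs v) :=
        Int.nonneg_of_mul_nonneg_right hd (by omega)
      exact pvStop cs m v hvm hmLt (by omega)
    · rw [if_neg hd]
      have hdneg : (p - v) * (pvLe cs v - ((cs.length : Int) - pvLe cs v)) < 0 := by omega
      have hlt2 : 2 * pvLe cs v < (cs.length : Int) := by
        have := Int.neg_of_mul_neg_right hdneg (by omega)
        omega
      have hvm' : v < m := by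
        rcases eq_or_lt_of_le hvm with rfl | h
        · omega
        · exact h
      have hpm : p ≤ m := by
        rcases hcov m hm with h | h
        · omega
        · rcases List.mem_cons.mp h with rfl | h2
          · exact le_refl _
          · exact le_of_lt (hhead m h2)
      have hgap : ∀ c ∈ cs, c ≤ v ∨ p ≤ c := by
        intro c hc
        rcases hcov c hc with h | h
        · exact Or.inl h
        · rcases List.mem_cons.mp h with rfl | h2
          · exact Or.inr (le_refl _)
          · exact Or.inr (le_of_lt (hhead c h2))
      have hLep : pvLe cs p = pvLe cs v + (cs.count p : Int) := by
        rw [pvLe_split cs v p (le_of_lt hvp)]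
        congr 1
        rw [List.count_eq_countP]
        exact_mod_cast congrArg Nat.cast (pvCountP_congr cs _ _ (fun a ha => by
          rcases hgap a ha with h | h
          · have h1 : ¬ (v < a ∧ a ≤ p) := by omega
            have h2 : ¬ a = p := by omega
            simp [h1, h2]
          · by_cases h2 : a = p
            · subst h2
              simp [hvp]
            · have h1 : ¬ (v < a ∧ a ≤ p) := by
                intro hh
                exact h2 (le_antisymm hh.2 h)
              simp [h1, h2]))
      have hG : pvG cs v + (p - v) * (pvLe cs v - ((cs.length : Int) - pvLe cs v)) = pvG cs p := by
        rw [pvG_step cs v p (le_of_lt hvp) hgap]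
        ring
      have hcov' : ∀ c ∈ cs, c ≤ p ∨ c ∈ ps := by
        intro c hc
        rcases hcov c hc with h | h
        · exact Or.inl (le_trans h (le_of_lt hvp))
        · rcases List.mem_cons.mp h with rfl | h2
          · exact Or.inl (le_refl _)
          · exact Or.inr h2
      have hmemq' : ∀ q ∈ ps, p < q ∧ q ∈ cs := by
        intro q hq
        exact ⟨hhead q hq, (hmemq q (List.mem_cons_of_mem _ hq)).2⟩
      have := ih p hpcs hpm htail hmemq' hcov'
      rw [PySem.Dict.getD_counter, hG]
      have e1 : pvLe cs v + (cs.count p : Int) = pvLe cs p := hLep.symm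
      have e2 : (cs.length : Int) - pvLe cs v - (cs.count p : Int) = (cs.length : Int) - pvLe cs p := by
        omega
      rw [e1, e2]
      exact this

-- the median value B picks
def pvMed (cs : List Int) : Int :=
  (PySem.List.sorted cs (fun x => x) false).getD (cs.length / 2) 0

-- median facts
lemma pvMedian (cs : List Int) (hne : cs ≠ []) :
    pvMed cs ∈ cs ∧ 2 * pvLt cs (pvMed cs) ≤ (cs.length : Int) ∧
      (cs.length : Int) < 2 * pvLe cs (pvMed cs) := by
  set s := PySem.List.sorted cs (fun x => x) false with hs
  have hlen : s.length = cs.length := PySem.List.length_sorted cs (fun x => x) false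
  have hpos : 0 < cs.length := List.length_pos_iff.mpr hne
  set k := cs.length / 2 with hk
  have hklt : k < s.length := by omega
  have hmed : pvMed cs = s[k] := by
    rw [pvMed, ← hs, List.getD_eq_getElem s 0 hklt]
  have hmono : ∀ (p q : Nat) (hq : q < s.length) (hpq : p ≤ q), s[p]'(by omega) ≤ s[q] := by
    intro p q hq hpq
    simp only [hs] at hq ⊢
    exact PySem.List.sorted_id_getElem_mono cs hpq hq
  have hmem : pvMed cs ∈ cs := by
    rw [hmed]
    exact (PySem.List.mem_sorted cs (fun x => x) false _).mp (List.getElem_mem hklt)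
  refine ⟨hmem, ?_, ?_⟩
  · -- at most k elements strictly below the median
    have hperm : cs.countP (fun c => decide (c < pvMed cs)) =
        s.countP (fun c => decide (c < pvMed cs)) :=
      (List.Perm.countP_eq _ (PySem.List.sorted_perm cs (fun x => x) false)).symm
    have hdrop : (s.drop k).countP (fun c => decide (c < pvMed cs)) = 0 := by
      apply List.countP_eq_zero.mpr
      intro a ha
      rcases List.mem_iff_getElem.mp ha with ⟨j, hj, rfl⟩
      rw [List.getElem_drop]
      rw [List.length_drop] at hj
      have : s[k] ≤ s[k + j] := hmono k (k + j) (by omega) (by omega)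
      simp only [decide_eq_true_eq, hmed]
      omega
    have hsplit : s.countP (fun c => decide (c < pvMed cs)) =
        (s.take k).countP (fun c => decide (c < pvMed cs)) +
        (s.drop k).countP (fun c => decide (c < pvMed cs)) := by
      rw [← List.countP_append, List.take_append_drop]
    have htake : (s.take k).countP (fun c => decide (c < pvMed cs)) ≤ k := by
      calc (s.take k).countP (fun c => decide (c < pvMed cs)) ≤ (s.take k).length :=
            List.countP_le_length
        _ ≤ k := by simp
    unfold pvLt
    have : cs.countP (fun c => decide (c < pvMed cs)) ≤ k := by omega
    omega
  · -- at least k+1 elements ≤ the median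
    have hperm : cs.countP (fun c => decide (c ≤ pvMed cs)) =
        s.countP (fun c => decide (c ≤ pvMed cs)) :=
      (List.Perm.countP_eq _ (PySem.List.sorted_perm cs (fun x => x) false)).symm
    have htake : (s.take (k + 1)).countP (fun c => decide (c ≤ pvMed cs)) =
        (s.take (k + 1)).length := by
      apply List.countP_eq_length.mpr
      intro a ha
      rcases List.mem_iff_getElem.mp ha with ⟨j, hj, rfl⟩
      rw [List.getElem_take]
      have hjk : j < k + 1 := lt_of_lt_of_le hj (by simp)
      have : s[j]'(by omega) ≤ s[k] := hmono j k hklt (by omega)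
      simp only [decide_eq_true_eq, hmed]
      omega
    have hlen2 : (s.take (k + 1)).length = k + 1 := by
      simp; omega
    have hsplit : s.countP (fun c => decide (c ≤ pvMed cs)) =
        (s.take (k + 1)).countP (fun c => decide (c ≤ pvMed cs)) +
        (s.drop (k + 1)).countP (fun c => decide (c ≤ pvMed cs)) := by
      rw [← List.countP_append, List.take_append_drop]
    unfold pvLe
    have : k + 1 ≤ cs.countP (fun c => decide (c ≤ pvMed cs)) := by omega
    omega

-- pvDimB computes pvG at the median
lemma pvDimB_eq (cs : List Int) : pvDimB cs = pvG cs (pvMed cs) := by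
  simp only [pvDimB, pvG, pvMed]
  have hlen : PySem.List.len (PySem.List.sorted cs (fun x => x) false) = (cs.length : Int) := by
    rw [PySem.List.len_eq, PySem.List.length_sorted cs (fun x => x) false]
  rw [hlen]
  have hfd : PySem.Int.floordiv (cs.length : Int) 2 = ((cs.length / 2 : Nat) : Int) := by
    exact_mod_cast PySem.Int.floordiv_natCast cs.length 2
  rw [hfd, PySem.List.pyGetD_natCast]
  exact List.Perm.sum_eq (List.Perm.map _ (PySem.List.sorted_perm cs (fun x => x) false))

-- per-dimension equivalence
lemma pvDim_main (cs : List Int) (hne : cs ≠ []) :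
    pvSearchA (cs.length : Int) (PySem.Dict.counter cs) = pvDimB cs := by
  rw [pvDimB_eq]
  obtain ⟨hm, hmLt, hmLe⟩ := pvMedian cs hne
  set m := pvMed cs with hmdef
  unfold pvSearchA
  rw [PySem.Dict.keys_counter]
  set pos := PySem.List.sorted (PySem.Set.ofList cs) (fun x => x) false with hposdef
  have hplt : pos.Pairwise (· < ·) := PySem.List.sorted_ofList_pairwise_lt cs
  have hmem : ∀ c, c ∈ pos ↔ c ∈ cs := by
    intro c
    rw [hposdef, PySem.List.mem_sorted, PySem.Set.mem_ofList]
  cases hp : pos with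
  | nil =>
    exfalso
    rcases List.exists_mem_of_ne_nil cs hne with ⟨c, hc⟩
    have := (hmem c).mpr hc
    rw [hp] at this
    cases this
  | cons p0 rest =>
    have hall : ∀ c ∈ cs, c ∈ p0 :: rest := fun c hc => hp ▸ (hmem c).mpr hc
    have hp0cs : p0 ∈ cs := (hmem p0).mp (hp ▸ List.mem_cons_self)
    cases rest with
    | nil =>
      have heq : ∀ c ∈ cs, c = p0 := by
        intro c hc
        rcases List.mem_cons.mp (hall c hc) with h | h
        · exact h
        · cases h
      have hmp0 : m = p0 := heq m hm
      have : pvG cs m = 0 := by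
        apply List.sum_eq_zero
        intro x hx
        rcases List.mem_map.mp hx with ⟨c, hc, rfl⟩
        rw [heq c hc, hmp0]
        simp
      rw [this]
    | cons q rest' =>
      have hplt' : (p0 :: q :: rest').Pairwise (· < ·) := hp ▸ hplt
      obtain ⟨hhead, htail⟩ := List.pairwise_cons.mp hplt'
      have hmin : ∀ c ∈ cs, p0 ≤ c := by
        intro c hc
        rcases List.mem_cons.mp (hall c hc) with rfl | h
        · exact le_refl _
        · exact le_of_lt (hhead c h)
      have hnodup : (p0 :: q :: rest').Nodup := hplt'.imp ne_of_lt
      have hcount : pvLe cs p0 = (cs.count p0 : Int) := by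
        unfold pvLe
        rw [List.count_eq_countP]
        exact_mod_cast congrArg Nat.cast (pvCountP_congr cs _ _ (fun a ha => by
          have := hmin a ha
          by_cases h : a = p0
          · simp [h]
          · have h1 : ¬ a ≤ p0 := fun hh => h (le_antisymm hh this)
            simp [h1, h]))
      have hgroup := pvGroup cs (p0 :: q :: rest') (fun c => c - p0) hnodup hall
      have hrd : ((q :: rest').map (fun p => (p - p0) * (PySem.Dict.counter cs).getD p 0)).sum
          = pvG cs p0 := by
        have hmapeq : ((q :: rest').map (fun p => (p - p0) * (PySem.Dict.counter cs).getD p 0))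
            = ((q :: rest').map (fun p => (cs.count p : Int) * (p - p0))) := by
          apply List.map_congr_left
          intro p _
          rw [PySem.Dict.getD_counter]
          ring
        rw [hmapeq]
        have hlhs : ((p0 :: q :: rest').map (fun p => (cs.count p : Int) * (p - p0))).sum
            = ((q :: rest').map (fun p => (cs.count p : Int) * (p - p0))).sum := by
          simp
        have hrhs : (cs.map (fun c => c - p0)).sum = pvG cs p0 := by
          unfold pvG
          apply congrArg
          apply List.map_congr_left
          intro c hc
          rw [abs_of_nonneg (by have := hmin c hc; omega)]
        rw [← hlhs, hgroup, hrhs]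
      show (if (cs.length : Int) - (PySem.Dict.counter cs).getD p0 0 ≤ (PySem.Dict.counter cs).getD p0 0
          then ((q :: rest').map (fun p => (p - p0) * (PySem.Dict.counter cs).getD p 0)).sum
          else pvSearchLoopA (PySem.Dict.counter cs) p0 ((PySem.Dict.counter cs).getD p0 0)
            ((cs.length : Int) - (PySem.Dict.counter cs).getD p0 0)
            (((q :: rest').map (fun p => (p - p0) * (PySem.Dict.counter cs).getD p 0)).sum)
            (q :: rest')) = pvG cs m
      rw [PySem.Dict.getD_counter, hrd]
      by_cases hif : (cs.length : Int) - (cs.count p0 : Int) ≤ (cs.count p0 : Int)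
      · rw [if_pos hif]
        exact pvStop cs m p0 (hmin m hm) hmLt (by omega)
      · rw [if_neg hif]
        rw [← hcount]
        apply pvLoop cs m hm hmLt hmLe (q :: rest') p0 hp0cs (hmin m hm) htail
        · intro p hpq
          exact ⟨hhead p hpq, (hmem p).mp (hp ▸ List.mem_cons_of_mem _ hpq)⟩
        · intro c hc
          rcases List.mem_cons.mp (hall c hc) with rfl | h
          · exact Or.inl (le_refl _)
          · exact Or.inr h

-- the two-accumulator fold is the pair of counters
lemma pvFoldPair (points : List (Int × Int)) :
    points.foldl
      (fun d pt => (d.1.modify pt.1 0 (· + 1), d.2.modify pt.2 0 (· + 1)))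
      (PySem.Dict.empty, PySem.Dict.empty)
    = (PySem.Dict.counter (points.map (fun p => p.1)),
       PySem.Dict.counter (points.map (fun p => p.2))) := by
  rw [PySem.List.foldl_prod_mk (f := fun d (pt : Int × Int) => PySem.Dict.modify d pt.1 0 (· + 1))
        (g := fun d (pt : Int × Int) => PySem.Dict.modify d pt.2 0 (· + 1))]
  rw [PySem.Dict.counter_eq_foldl, PySem.Dict.counter_eq_foldl, List.foldl_map, List.foldl_map]

-- ===== VERDICT (by name: the statement is the Claim_ definition above) =====
theorem best_meeting_point_spec : Claim_equal_best_meeting_point := by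
  intro points _ hpre
  unfold Spec_best_meeting_point best_meeting_point best_meeting_point_alt
  rw [pvFoldPair]
  have hx : points.map (fun p => p.1) ≠ [] := by simpa using hpre
  have hy : points.map (fun p => p.2) ≠ [] := by simpa using hpre
  have ex := pvDim_main (points.map (fun p => p.1)) hx
  have ey := pvDim_main (points.map (fun p => p.2)) hy
  simp only [List.length_map] at ex ey
  simp [ex, ey]
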